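-- pv_equiv track=rewrite | github.com/MoimmaK/detectifAI_deployment | backend/video_captioning/video_captioning/caption_sanitizer.py | _is_caption_safe
-- ===== SOURCE A (Python) =====
-- def _is_caption_safe(caption: str) -> bool:
--     """Validate that caption meets safety requirements"""
--     caption_lower = caption.lower()
--
--     # Check for prohibited terms
--     prohibited_terms = [
--         'gender', 'race', 'skin', 'color', 'age', 'appearance',
--         'man', 'woman', 'male', 'female', 'boy', 'girl',
--         'black', 'white', 'asian', 'hispanic', 'latino',
--         'young', 'old', 'elderly', 'child', 'teenager'
--     ]
--
--     for term in prohibited_terms: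
--         if term in caption_lower:
--             return False
--
--     return True
-- ===== SOURCE B (Python) =====
-- PROHIBITED_TERMS = (
--     'gender', 'race', 'skin', 'color', 'age', 'appearance',
--     'man', 'woman', 'male', 'female', 'boy', 'girl',
--     'black', 'white', 'asian', 'hispanic', 'latino',
--     'young', 'old', 'elderly', 'child', 'teenager'
-- )
--
-- def _is_caption_safe(caption: str) -> bool:
--     """Single left-to-right pass: at each position, test whether any
--     prohibited term starts there (str.startswith with a tuple)."""
--     caption_lower = caption.lower()
--     for i in range(len(caption_lower)):
--         if caption_lower.startswith(PROHIBITED_TERMS, i):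
--             return False
--     return True
-- ===== Notes on version B (the rewrite author's own statement) =====
-- stated objective: alternative
-- what changed: Instead of 22 independent full substring-containment scans of the lowered caption, one per prohibited term, B makes a single left-to-right pass over the lowered caption, testing at each position whether any prohibited term begins there via one startswith call with the term tuple.
import Mathlib
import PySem

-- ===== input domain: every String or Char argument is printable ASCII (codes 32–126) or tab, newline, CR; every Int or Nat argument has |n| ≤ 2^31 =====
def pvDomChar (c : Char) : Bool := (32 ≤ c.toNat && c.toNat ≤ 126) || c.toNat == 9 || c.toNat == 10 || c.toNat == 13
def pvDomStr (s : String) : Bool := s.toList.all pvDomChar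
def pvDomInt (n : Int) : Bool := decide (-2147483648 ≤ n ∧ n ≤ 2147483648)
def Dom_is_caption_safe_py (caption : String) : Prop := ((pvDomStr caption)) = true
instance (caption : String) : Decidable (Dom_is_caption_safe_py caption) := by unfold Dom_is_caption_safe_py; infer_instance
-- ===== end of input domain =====

-- B replaces A's 22 independent full substring scans with ONE left-to-right pass over the
-- lowered caption, testing at each position whether any prohibited term starts there
-- (objective: alternative traversal, same exact results).

-- the prohibited-term list, identical in both programs
def pvTerms : List String :=
  ["gender", "race", "skin", "color", "age", "appearance",
   "man", "woman", "male", "female", "boy", "girl",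
   "black", "white", "asian", "hispanic", "latino",
   "young", "old", "elderly", "child", "teenager"]

-- ===== PORT A =====
-- the 'for term in prohibited_terms: if term in caption_lower: return False' loop
def pvLoopA : List String → String → Bool
  | [], _ => true
  | t :: ts, cl => if PySem.Str.isIn t cl then false else pvLoopA ts cl

def is_caption_safe_py (caption : String) : Bool :=
  pvLoopA pvTerms (PySem.Str.lower caption)

-- ===== PORT B =====
-- the 'for i in range(len(cl)): if cl.startswith(PROHIBITED_TERMS, i): return False' pass,
-- as structural recursion over the successive suffixes of the lowered caption
def pvScanB : List Char → Bool
  | [] => true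
  | c :: rest =>
      if pvTerms.any (fun t => t.toList.isPrefixOf (c :: rest)) then false
      else pvScanB rest

def is_caption_safe_py_alt (caption : String) : Bool :=
  pvScanB (PySem.Str.lower caption).toList

-- ===== PRECONDITION & SPEC =====
def Spec_is_caption_safe_py (caption : String) (out : Bool) : Prop := out = is_caption_safe_py_alt caption
instance (caption : String) (out : Bool) : Decidable (Spec_is_caption_safe_py caption out) := by unfold Spec_is_caption_safe_py; infer_instance

-- ===== CLAIM (what is proved, stated in full; the proofs are below) =====
def Claim_equal_is_caption_safe_py : Prop := ∀ (caption : String), Dom_is_caption_safe_py caption → Spec_is_caption_safe_py caption (is_caption_safe_py caption)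

-- ===== LEMMAS AND PROOFS =====

-- no prohibited term is the empty string
theorem pvTerms_ne_nil : ∀ t ∈ pvTerms, t.toList ≠ [] := by decide

-- A's loop answers: no term is an infix of cl
theorem pvLoopA_eq (ts : List String) (cl : String) :
    pvLoopA ts cl = ts.all (fun t => !decide (t.toList <:+: cl.toList)) := by
  induction ts with
  | nil => rfl
  | cons t ts ih =>
      simp only [pvLoopA, List.all_cons]
      have hi := PySem.Str.isIn_iff_infix t cl
      by_cases h : t.toList <:+: cl.toList
      · rw [if_pos (hi.mpr h)]
        simp [h]
      · rw [if_neg (fun hc => h (hi.mp hc))]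
        simp [h, ih]

-- B's suffix scan answers the same question
theorem pvScanB_eq (cs : List Char) :
    pvScanB cs = pvTerms.all (fun t => !decide (t.toList <:+: cs)) := by
  induction cs with
  | nil =>
      simp only [pvScanB]
      symm
      rw [List.all_eq_true]
      intro t ht
      have := pvTerms_ne_nil t ht
      simp [List.infix_nil, this]
  | cons c rest ih =>
      simp only [pvScanB]
      by_cases h : pvTerms.any (fun t => t.toList.isPrefixOf (c :: rest)) = true
      · rw [if_pos h]
        rcases List.any_eq_true.mp h with ⟨t, ht, hp⟩
        have hpre : t.toList <+: c :: rest := List.isPrefixOf_iff_prefix.mp hp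
        symm
        rw [List.all_eq_false]
        exact ⟨t, ht, by simp [List.infix_cons_iff, hpre]⟩
      · rw [if_neg h, ih]
        have hnp : ∀ t ∈ pvTerms, ¬ t.toList <+: c :: rest := by
          intro t ht hp
          exact h (List.any_eq_true.mpr ⟨t, ht, List.isPrefixOf_iff_prefix.mpr hp⟩)
        rw [Bool.eq_iff_iff, List.all_eq_true, List.all_eq_true]
        constructor
        · intro hall t ht
          have := hall t ht
          simp only [Bool.not_eq_eq_eq_not, Bool.not_true, decide_eq_false_iff_not] at this ⊢
          rw [List.infix_cons_iff]
          exact fun hc => hc.elim (hnp t ht) this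
        · intro hall t ht
          have := hall t ht
          simp only [Bool.not_eq_eq_eq_not, Bool.not_true, decide_eq_false_iff_not] at this ⊢
          rw [List.infix_cons_iff] at this
          exact fun hc => this (Or.inr hc)

-- ===== VERDICT (by name: the statement is the Claim_ definition above) =====
theorem is_caption_safe_py_spec : Claim_equal_is_caption_safe_py := by
  intro caption _
  unfold Spec_is_caption_safe_py is_caption_safe_py is_caption_safe_py_alt
  rw [pvLoopA_eq, pvScanB_eq]
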